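-- pv_equiv track=rewrite | github.com/checkertron-coder/createstage-quoting-app | backend/calculators/material_lookup.py | _profile_to_description
-- ===== SOURCE A (Python) =====
-- def _profile_to_description(profile):
--     """
--     Convert a profile key to a human-readable description.
--     e.g. 'sq_tube_2x2_11ga' -> '2x2 Square Tube 11ga'
--          'flat_bar_1x0.25' -> '1x0.25 Flat Bar'
--     """
--     if not profile:
--         return ""
--     shape_names = {
--         "al_sq_tube": "Aluminum Square Tube",
--         "al_rect_tube": "Aluminum Rectangular Tube",
--         "al_round_tube": "Aluminum Round Tube",
--         "al_flat_bar": "Aluminum Flat Bar",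
--         "al_angle": "Aluminum Angle",
--         "al_sheet": "Aluminum Sheet",
--         "sq_tube": "Square Tube",
--         "rect_tube": "Rectangular Tube",
--         "round_tube": "Round Tube",
--         "sq_bar": "Square Bar",
--         "round_bar": "Round Bar",
--         "flat_bar": "Flat Bar",
--         "dom_tube": "DOM Tube",
--         "angle": "Angle Iron",
--         "channel": "Channel",
--         "pipe": "Pipe",
--         "hss": "HSS",
--     }
--     prefixes = [
--         "al_sq_tube", "al_rect_tube", "al_round_tube",
--         "al_flat_bar", "al_angle", "al_sheet",
--         "sq_tube", "rect_tube", "round_tube",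
--         "sq_bar", "round_bar", "flat_bar",
--         "dom_tube", "angle", "channel", "pipe", "hss",
--     ]
--     for prefix in prefixes:
--         if profile.startswith(prefix + "_"):
--             suffix = profile[len(prefix) + 1:]
--             shape_label = shape_names.get(prefix, prefix.replace("_", " ").title())
--             return "%s %s" % (suffix.replace("_", " "), shape_label)
--     return profile.replace("_", " ").title()
-- ===== SOURCE B (Python) =====
-- def _profile_to_description(profile):
--     """
--     Convert a profile key to a human-readable description.
--
--     Instead of scanning a fixed list of prefixes, scan the underscore
--     positions of the profile from right to left and take the longest
--     leading candidate that is a known shape key.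
--     """
--     if not profile:
--         return ""
--     shape_names = {
--         "al_sq_tube": "Aluminum Square Tube",
--         "al_rect_tube": "Aluminum Rectangular Tube",
--         "al_round_tube": "Aluminum Round Tube",
--         "al_flat_bar": "Aluminum Flat Bar",
--         "al_angle": "Aluminum Angle",
--         "al_sheet": "Aluminum Sheet",
--         "sq_tube": "Square Tube",
--         "rect_tube": "Rectangular Tube",
--         "round_tube": "Round Tube",
--         "sq_bar": "Square Bar",
--         "round_bar": "Round Bar",
--         "flat_bar": "Flat Bar",
--         "dom_tube": "DOM Tube",
--         "angle": "Angle Iron",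
--         "channel": "Channel",
--         "pipe": "Pipe",
--         "hss": "HSS",
--     }
--     cuts = [i for i, ch in enumerate(profile) if ch == "_"]
--     for p in reversed(cuts):
--         candidate = profile[:p]
--         if candidate in shape_names:
--             return "%s %s" % (profile[p + 1:].replace("_", " "), shape_names[candidate])
--     return profile.replace("_", " ").title()
-- ===== Notes on version B (the rewrite author's own statement) =====
-- stated objective: alternative
-- what changed: Instead of testing the profile against a fixed 17-prefix list in priority order, B collects the underscore positions of the profile and scans them right-to-left, taking the longest leading candidate that is a key of the shape table.
import Mathlib
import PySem

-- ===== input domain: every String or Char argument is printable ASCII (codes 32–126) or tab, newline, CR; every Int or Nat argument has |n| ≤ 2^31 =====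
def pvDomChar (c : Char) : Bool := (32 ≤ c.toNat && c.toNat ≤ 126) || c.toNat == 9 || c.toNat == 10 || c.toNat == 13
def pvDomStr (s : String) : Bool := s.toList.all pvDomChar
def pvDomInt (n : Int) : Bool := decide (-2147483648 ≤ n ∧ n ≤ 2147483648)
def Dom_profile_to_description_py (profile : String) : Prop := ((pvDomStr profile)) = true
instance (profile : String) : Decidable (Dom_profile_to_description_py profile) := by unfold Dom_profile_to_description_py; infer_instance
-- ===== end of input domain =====

-- B replaces A's scan over a fixed 17-prefix list by a right-to-left scan over the
-- underscore positions of the profile with a dict-membership test (objective: alternative).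

-- ===== shared helpers (the same Python lines occur in A and B) =====

-- Python str.title(), hand-ported (exact on ASCII: a letter is uppercased after a
-- non-letter and lowercased after a letter; non-letters are kept)
def pvTitleGo : List Char → Bool → List Char
  | [], _ => []
  | c :: rest, prev =>
    (if PySem.Chars.isalpha c then
        (if prev then PySem.Chars.lowerChar c else PySem.Chars.upperChar c)
      else c) :: pvTitleGo rest (PySem.Chars.isalpha c)

def pvTitle (s : String) : String := String.ofList (pvTitleGo s.toList false)

-- the shape_names dict literal (insertion order)
def pvShapeNames : PySem.Dict String String := ⟨[
  ("al_sq_tube", "Aluminum Square Tube"),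
  ("al_rect_tube", "Aluminum Rectangular Tube"),
  ("al_round_tube", "Aluminum Round Tube"),
  ("al_flat_bar", "Aluminum Flat Bar"),
  ("al_angle", "Aluminum Angle"),
  ("al_sheet", "Aluminum Sheet"),
  ("sq_tube", "Square Tube"),
  ("rect_tube", "Rectangular Tube"),
  ("round_tube", "Round Tube"),
  ("sq_bar", "Square Bar"),
  ("round_bar", "Round Bar"),
  ("flat_bar", "Flat Bar"),
  ("dom_tube", "DOM Tube"),
  ("angle", "Angle Iron"),
  ("channel", "Channel"),
  ("pipe", "Pipe"),
  ("hss", "HSS")]⟩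

-- ===== PORT A =====

def pvPrefixes : List String := [
  "al_sq_tube", "al_rect_tube", "al_round_tube",
  "al_flat_bar", "al_angle", "al_sheet",
  "sq_tube", "rect_tube", "round_tube",
  "sq_bar", "round_bar", "flat_bar",
  "dom_tube", "angle", "channel", "pipe", "hss"]

-- the 'for prefix in prefixes' loop of A
def pvLoopA (profile : String) : List String → String
  | [] => pvTitle (PySem.Str.replace profile "_" " ")
  | p :: rest =>
    if PySem.Str.startswith profile (p ++ "_") then
      PySem.Str.replace (PySem.Str.slice profile (some (PySem.Str.len p + 1)) none) "_" " "
        ++ " " ++ pvShapeNames.getD p (pvTitle (PySem.Str.replace p "_" " "))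
    else pvLoopA profile rest

def profile_to_description_py (profile : String) : String :=
  if profile = "" then "" else pvLoopA profile pvPrefixes

-- ===== PORT B =====

-- cuts = [i for i, ch in enumerate(profile) if ch == "_"]
def pvCuts (profile : String) : List Int :=
  (PySem.List.enumerate profile.toList).filterMap
    (fun ic => if ic.2 = '_' then some ic.1 else none)

-- the 'for p in reversed(cuts)' loop of B
def pvLoopB (profile : String) : List Int → String
  | [] => pvTitle (PySem.Str.replace profile "_" " ")
  | p :: rest =>
    let candidate := PySem.Str.slice profile none (some p)
    if pvShapeNames.contains candidate then
      PySem.Str.replace (PySem.Str.slice profile (some (p + 1)) none) "_" " "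
        ++ " " ++ pvShapeNames.getD candidate ""
    else pvLoopB profile rest

def profile_to_description_py_alt (profile : String) : String :=
  if profile = "" then "" else pvLoopB profile (pvCuts profile).reverse

-- ===== PRECONDITION & SPEC =====
def Spec_profile_to_description_py (profile : String) (out : String) : Prop := out = profile_to_description_py_alt profile
instance (profile : String) (out : String) : Decidable (Spec_profile_to_description_py profile out) := by unfold Spec_profile_to_description_py; infer_instance

-- ===== CLAIM (what is proved, stated in full; the proofs are below) =====
def Claim_equal_profile_to_description_py : Prop := ∀ (profile : String), Dom_profile_to_description_py profile → Spec_profile_to_description_py profile (profile_to_description_py profile)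

-- ===== LEMMAS AND PROOFS =====

-- no key of the table, extended by '_', is a prefix of another key
theorem pv_keys_sep_free :
    ∀ k ∈ pvPrefixes, ∀ k' ∈ pvPrefixes, ¬ (k.toList ++ ['_'] <+: k'.toList) := by decide

set_option maxRecDepth 8192 in
theorem pv_contains_iff (c : String) :
    pvShapeNames.contains c = true ↔ c ∈ pvPrefixes := by
  simp only [pvShapeNames, pvPrefixes, PySem.Dict.contains, List.any_cons, List.any_nil,
    Bool.or_eq_true, beq_iff_eq, List.mem_cons, List.not_mem_nil, Bool.false_eq_true, or_false]
  constructor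
  · rintro (rfl|rfl|rfl|rfl|rfl|rfl|rfl|rfl|rfl|rfl|rfl|rfl|rfl|rfl|rfl|rfl|rfl) <;> simp
  · rintro (rfl|rfl|rfl|rfl|rfl|rfl|rfl|rfl|rfl|rfl|rfl|rfl|rfl|rfl|rfl|rfl|rfl) <;> simp

theorem pv_getD_congr {κ ν : Type} [BEq κ] [LawfulBEq κ] (d : PySem.Dict κ ν) (k : κ)
    (h : d.contains k = true) (a b : ν) : d.getD k a = d.getD k b := by
  have hs : (d.items.find? (fun q => q.1 == k)).isSome := by
    rw [List.find?_isSome]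
    simpa [PySem.Dict.contains, List.any_eq_true] using h
  simp only [PySem.Dict.getD, PySem.Dict.get?]
  cases hf : d.items.find? (fun q => q.1 == k) <;> simp_all

-- a prefix 'k ++ "_"' is exactly a cut at position k.length whose candidate is k
theorem pv_match_iff (l k : List Char) :
    (k ++ ['_'] <+: l) ↔ (l[k.length]? = some '_' ∧ l.take k.length = k) := by
  constructor
  · rintro ⟨t, rfl⟩
    rw [List.append_assoc]
    simp
  · rintro ⟨hget, htake⟩
    obtain ⟨hlt, hc⟩ := List.getElem?_eq_some_iff.mp hget
    have hdrop : l.drop k.length = '_' :: l.drop (k.length + 1) := by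
      rw [List.drop_eq_getElem_cons hlt, hc]
    refine ⟨l.drop (k.length + 1), ?_⟩
    rw [List.append_assoc]
    conv_rhs => rw [← List.take_append_drop k.length l, hdrop, htake]
    rfl

theorem pv_startswith_iff (profile k : String) :
    PySem.Str.startswith profile (k ++ "_") = true ↔ (k.toList ++ ['_'] <+: profile.toList) := by
  have h : (k ++ "_").toList = k.toList ++ ['_'] := by simp [String.toList_append]
  rw [PySem.Str.startswith_eq, PySem.Chars.startswith_iff, h]

theorem pv_mem_cuts_iff (profile : String) (p : Int) :
    p ∈ pvCuts profile ↔ ∃ n : Nat, p = (n : Int) ∧ profile.toList[n]? = some '_' := by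
  simp only [pvCuts, List.mem_filterMap, PySem.List.mem_enumerate_iff]
  constructor
  · rintro ⟨⟨i, c⟩, ⟨n, hn, hic⟩, hif⟩
    cases hic
    by_cases hc : profile.toList[n] = '_'
    · refine ⟨n, ?_, by simp [List.getElem?_eq_getElem hn, hc]⟩
      simp [hc] at hif
      omega
    · simp [hc] at hif
  · rintro ⟨n, rfl, hget⟩
    obtain ⟨hn, hc⟩ := List.getElem?_eq_some_iff.mp hget
    exact ⟨((0 : Int) + (n : Int), profile.toList[n]), ⟨n, hn, rfl⟩, by simp [hc]⟩

-- candidate at a cut n is the first n characters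
theorem pv_candidate_toList (profile : String) (n : Nat) :
    (PySem.Str.slice profile none (some (n : Int))).toList = profile.toList.take n := by
  simp [PySem.Str.toList_slice, PySem.Chars.slice_eq_listSlice,
    PySem.List.slice_to profile.toList (Int.natCast_nonneg n)]

-- at most one key matches a given profile
theorem pv_uniq {profile : String} {k k' : String}
    (hk : k ∈ pvPrefixes) (hk' : k' ∈ pvPrefixes)
    (h1 : k.toList ++ ['_'] <+: profile.toList)
    (h2 : k'.toList ++ ['_'] <+: profile.toList) : k = k' := by
  have key : ∀ a b : String, a ∈ pvPrefixes → b ∈ pvPrefixes →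
      (a.toList ++ ['_'] <+: b.toList ++ ['_']) → a = b := by
    intro a b ha hb hpre
    rcases Nat.lt_or_ge a.toList.length b.toList.length with hlt | hge
    · exfalso
      exact pv_keys_sep_free a ha b hb
        ((List.isPrefix_append_of_length (by simpa using hlt)).mp hpre)
    · have hlen : (a.toList ++ ['_']).length = (b.toList ++ ['_']).length := by
        have h1 := hpre.length_le
        simp only [List.length_append, List.length_cons, List.length_nil] at h1 ⊢
        omega
      have h2 := hpre.eq_of_length hlen
      exact String.toList_inj.mp (List.append_cancel_right h2)
  rcases List.prefix_or_prefix_of_prefix h1 h2 with h | h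
  · exact key k k' hk hk' h
  · exact (key k' k hk' hk h).symm

-- A's loop: falls through when nothing matches
theorem pv_loopA_nomatch (profile : String) (L : List String)
    (h : ∀ p ∈ L, ¬ (p.toList ++ ['_'] <+: profile.toList)) :
    pvLoopA profile L = pvTitle (PySem.Str.replace profile "_" " ") := by
  induction L with
  | nil => rfl
  | cons p rest ih =>
    rw [pvLoopA, if_neg, ih (fun q hq => h q (List.mem_cons_of_mem p hq))]
    simp only [pv_startswith_iff]
    exact h p (List.mem_cons_self ..)

-- A's loop: returns at the (unique) matching key
theorem pv_loopA_match (profile : String) (k : String) (hk : k ∈ pvPrefixes)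
    (hm : k.toList ++ ['_'] <+: profile.toList) :
    ∀ L : List String, (∀ p ∈ L, p ∈ pvPrefixes) → k ∈ L →
    pvLoopA profile L =
      PySem.Str.replace (PySem.Str.slice profile (some (PySem.Str.len k + 1)) none) "_" " "
        ++ " " ++ pvShapeNames.getD k (pvTitle (PySem.Str.replace k "_" " ")) := by
  intro L
  induction L with
  | nil => intro _ h; cases h
  | cons p rest ih =>
    intro hsub hmem
    by_cases hpk : p = k
    · subst hpk
      rw [pvLoopA, if_pos ((pv_startswith_iff profile p).mpr hm)]
    · have hkr : k ∈ rest := by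
        rcases List.mem_cons.mp hmem with h | h
        · exact absurd h.symm hpk
        · exact h
      rw [pvLoopA, if_neg, ih (fun q hq => hsub q (List.mem_cons_of_mem p hq)) hkr]
      simp only [pv_startswith_iff]
      intro hp
      exact hpk (pv_uniq (hsub p (List.mem_cons_self ..)) hk hp hm)

-- B's loop: falls through when nothing matches
theorem pv_loopB_nomatch (profile : String)
    (h : ∀ q ∈ pvPrefixes, ¬ (q.toList ++ ['_'] <+: profile.toList)) :
    ∀ cs : List Int, (∀ p ∈ cs, p ∈ pvCuts profile) →
    pvLoopB profile cs = pvTitle (PySem.Str.replace profile "_" " ") := by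
  intro cs
  induction cs with
  | nil => intro _; rfl
  | cons p rest ih =>
    intro hsub
    obtain ⟨n, rfl, hget⟩ := (pv_mem_cuts_iff profile p).mp (hsub p (List.mem_cons_self ..))
    obtain ⟨hn, -⟩ := List.getElem?_eq_some_iff.mp hget
    simp only [pvLoopB]
    rw [if_neg, ih (fun q hq => hsub q (List.mem_cons_of_mem _ hq))]
    intro hcon
    set c := PySem.Str.slice profile none (some (n : Int)) with hc
    have hcmem : c ∈ pvPrefixes := (pv_contains_iff c).mp hcon
    apply h c hcmem
    rw [pv_match_iff]
    have hct : c.toList = profile.toList.take n := pv_candidate_toList profile n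
    have hlen : c.toList.length = n := by
      rw [hct]; simp only [List.length_take]; omega
    refine ⟨by rw [hlen]; exact hget, by rw [hlen, hct]⟩

-- B's loop: returns at the cut of the (unique) matching key
theorem pv_loopB_match (profile : String) (k : String) (hk : k ∈ pvPrefixes)
    (hm : k.toList ++ ['_'] <+: profile.toList) :
    ∀ cs : List Int, (∀ p ∈ cs, p ∈ pvCuts profile) → ((k.toList.length : Int) ∈ cs) →
    pvLoopB profile cs =
      PySem.Str.replace (PySem.Str.slice profile (some ((k.toList.length : Int) + 1)) none) "_" " "
        ++ " " ++ pvShapeNames.getD k "" := by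
  intro cs
  induction cs with
  | nil => intro _ h; cases h
  | cons p rest ih =>
    intro hsub hmem
    obtain ⟨n, rfl, hget⟩ := (pv_mem_cuts_iff profile p).mp (hsub p (List.mem_cons_self ..))
    obtain ⟨hn, -⟩ := List.getElem?_eq_some_iff.mp hget
    simp only [pvLoopB]
    set c := PySem.Str.slice profile none (some (n : Int)) with hc
    have hct : c.toList = profile.toList.take n := pv_candidate_toList profile n
    have hlen : c.toList.length = n := by
      rw [hct]; simp only [List.length_take]; omega
    by_cases hpk : n = k.toList.length
    · subst hpk
      have hck : c = k := by
        apply String.toList_inj.mp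
        rw [hct]
        exact ((pv_match_iff profile.toList k.toList).mp hm).2
      rw [if_pos (by rw [hck]; exact (pv_contains_iff k).mpr hk), hck]
    · have hkr : (k.toList.length : Int) ∈ rest := by
        rcases List.mem_cons.mp hmem with h | h
        · exact absurd (by exact_mod_cast h.symm) hpk
        · exact h
      rw [if_neg, ih (fun q hq => hsub q (List.mem_cons_of_mem _ hq)) hkr]
      intro hcon
      have hcmem : c ∈ pvPrefixes := (pv_contains_iff c).mp hcon
      have hcm : c.toList ++ ['_'] <+: profile.toList := by
        rw [pv_match_iff]
        exact ⟨by rw [hlen]; exact hget, by rw [hlen, hct]⟩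
      have huq := pv_uniq hcmem hk hcm hm
      apply hpk
      rw [← hlen, huq]

-- every match is a cut
theorem pv_match_mem_cuts (profile : String) (k : String)
    (hm : k.toList ++ ['_'] <+: profile.toList) :
    ((k.toList.length : Int)) ∈ pvCuts profile := by
  rw [pv_mem_cuts_iff]
  exact ⟨k.toList.length, rfl, ((pv_match_iff profile.toList k.toList).mp hm).1⟩

-- ===== VERDICT (by name: the statement is the Claim_ definition above) =====
theorem profile_to_description_py_spec : Claim_equal_profile_to_description_py := by
  intro profile _
  unfold Spec_profile_to_description_py profile_to_description_py profile_to_description_py_alt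
  by_cases hemp : profile = ""
  · simp [hemp]
  · rw [if_neg hemp, if_neg hemp]
    by_cases hm : ∃ k ∈ pvPrefixes, (k.toList ++ ['_'] <+: profile.toList)
    · obtain ⟨k, hk, hkm⟩ := hm
      rw [pv_loopA_match profile k hk hkm pvPrefixes (fun _ h => h) hk,
        pv_loopB_match profile k hk hkm (pvCuts profile).reverse
          (fun p hp => List.mem_reverse.mp hp)
          (List.mem_reverse.mpr (pv_match_mem_cuts profile k hkm))]
      have hlen : PySem.Str.len k = (k.toList.length : Int) := PySem.Str.len_eq k
      rw [hlen, pv_getD_congr pvShapeNames k ((pv_contains_iff k).mpr hk)]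
    · push_neg at hm
      rw [pv_loopA_nomatch profile pvPrefixes hm,
        pv_loopB_nomatch profile hm (pvCuts profile).reverse (fun p hp => List.mem_reverse.mp hp)]
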